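-- pv_equiv track=rewrite | github.com/MutenAI/text-Generator-V4 | content-generation-system/src/llm_optimizer.py | _determine_task_complexity
-- ===== SOURCE A (Python) =====
-- def _determine_task_complexity(task_name: str) -> str:
--     """Determina la complessità di un task.
--
--     Args:
--         task_name: Nome del task
--
--     Returns:
--         Livello di complessità ('high', 'medium', 'low')
--     """
--     # Task che richiedono modelli potenti - ridotti al minimo essenziale
--     high_complexity_tasks = ["expert_review", "technical_draft"]
--
--     # Task di media complessità - incluso research (abbassato da high)
--     medium_complexity_tasks = ["research", "draft", "edit", "review"]
--
--     # Task semplici - incluso outline (abbassato da medium)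
--     low_complexity_tasks = ["outline", "finalize", "optimize", "brainstorm"]
--
--     # Gestisci i task uniti
--     if "_and_" in task_name:
--         subtasks = task_name.split("_and_")
--         # Usa la complessità più alta tra i subtask
--         for subtask in subtasks:
--             if subtask in high_complexity_tasks:
--                 return "high"
--         for subtask in subtasks:
--             if subtask in medium_complexity_tasks:
--                 return "medium"
--         return "low"
--
--     # Task singoli
--     if task_name in high_complexity_tasks:
--         return "high"
--     elif task_name in medium_complexity_tasks:
--         return "medium"
--     else:
--         return "low"
-- ===== SOURCE B (Python) =====
-- def _determine_task_complexity(task_name: str) -> str: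
--     """Determina la complessità di un task ('high', 'medium', 'low')."""
--     rank = {
--         "expert_review": 3,
--         "technical_draft": 3,
--         "research": 2,
--         "draft": 2,
--         "edit": 2,
--         "review": 2,
--     }
--     # One uniform pass: a plain name splits to itself, so single and
--     # compound task names are handled identically via a running max.
--     r = 1
--     for part in task_name.split("_and_"):
--         r = max(r, rank.get(part, 1))
--     return "high" if r == 3 else ("medium" if r == 2 else "low")
-- ===== Notes on version B (the rewrite author's own statement) =====
-- stated objective: simpler
-- what changed: Replaces the single-vs-compound branch and the separate high-scan-then-medium-scan loops with one uniform pass: split on '_and_' unconditionally and take a running max of a name-to-rank dict lookup (unknown -> 1), then map the rank back to the level string.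
import Mathlib
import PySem

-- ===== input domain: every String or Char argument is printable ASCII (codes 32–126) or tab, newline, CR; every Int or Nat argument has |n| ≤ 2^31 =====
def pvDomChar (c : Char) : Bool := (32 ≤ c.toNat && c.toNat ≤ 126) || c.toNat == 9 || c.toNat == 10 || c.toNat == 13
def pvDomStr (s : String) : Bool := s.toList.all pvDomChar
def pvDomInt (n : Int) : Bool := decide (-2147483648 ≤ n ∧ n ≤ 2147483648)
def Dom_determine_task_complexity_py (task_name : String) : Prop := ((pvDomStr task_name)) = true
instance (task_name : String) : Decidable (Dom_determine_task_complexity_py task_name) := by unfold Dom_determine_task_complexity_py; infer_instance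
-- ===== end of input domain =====

-- B collapses A's single-vs-compound branch and its two scan loops into one uniform
-- split-then-running-max pass over a name→rank table (objective: simpler).


-- ===== PORT A =====
def determine_task_complexity_py (task_name : String) : String :=
  let high_complexity_tasks : List String := ["expert_review", "technical_draft"]
  let medium_complexity_tasks : List String := ["research", "draft", "edit", "review"]
  -- (A also defines low_complexity_tasks = ["outline", "finalize", "optimize", "brainstorm"]; it is never read)
  if PySem.Str.isIn "_and_" task_name then
    -- split? is some here: the separator literal "_and_" is nonempty
    let subtasks := (PySem.Str.split? task_name "_and_").getD []
    if subtasks.any (fun subtask => high_complexity_tasks.contains subtask) then "high"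
    else if subtasks.any (fun subtask => medium_complexity_tasks.contains subtask) then "medium"
    else "low"
  else
    if high_complexity_tasks.contains task_name then "high"
    else if medium_complexity_tasks.contains task_name then "medium"
    else "low"

-- ===== PORT B =====
def pvRankDict : PySem.Dict String Int :=
  -- the Python dict literal has pairwise-distinct keys, so it is its own association list
  PySem.Dict.mk [("expert_review", 3), ("technical_draft", 3),
                 ("research", 2), ("draft", 2), ("edit", 2), ("review", 2)]

def determine_task_complexity_py_alt (task_name : String) : String :=
  -- split? is some here: the separator literal "_and_" is nonempty
  let parts := (PySem.Str.split? task_name "_and_").getD []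
  let r := parts.foldl (fun r part => max r (PySem.Dict.getD pvRankDict part 1)) 1
  if r == 3 then "high" else if r == 2 then "medium" else "low"

-- ===== PRECONDITION & SPEC =====
def Spec_determine_task_complexity_py (task_name : String) (out : String) : Prop := out = determine_task_complexity_py_alt task_name
instance (task_name : String) (out : String) : Decidable (Spec_determine_task_complexity_py task_name out) := by unfold Spec_determine_task_complexity_py; infer_instance

-- ===== CLAIM (what is proved, stated in full; the proofs are below) =====
def Claim_equal_determine_task_complexity_py : Prop := ∀ (task_name : String), Dom_determine_task_complexity_py task_name → Spec_determine_task_complexity_py task_name (determine_task_complexity_py task_name)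

-- ===== LEMMAS AND PROOFS =====

-- The rank lookup, characterised by the two membership tests A performs.
lemma rank_eq (p : String) :
    PySem.Dict.getD pvRankDict p 1 =
      (if (["expert_review", "technical_draft"] : List String).contains p then 3
       else if (["research", "draft", "edit", "review"] : List String).contains p then 2
       else 1) := by
  simp only [PySem.Dict.getD, PySem.Dict.get?, pvRankDict]
  by_cases h1 : p = "expert_review"
  · subst h1; decide
  by_cases h2 : p = "technical_draft"
  · subst h2; decide
  by_cases h3 : p = "research"
  · subst h3; decide
  by_cases h4 : p = "draft"
  · subst h4; decide
  by_cases h5 : p = "edit"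
  · subst h5; decide
  by_cases h6 : p = "review"
  · subst h6; decide
  have e1 : ("expert_review" == p) = false := beq_eq_false_iff_ne.mpr (fun e => h1 e.symm)
  have e2 : ("technical_draft" == p) = false := beq_eq_false_iff_ne.mpr (fun e => h2 e.symm)
  have e3 : ("research" == p) = false := beq_eq_false_iff_ne.mpr (fun e => h3 e.symm)
  have e4 : ("draft" == p) = false := beq_eq_false_iff_ne.mpr (fun e => h4 e.symm)
  have e5 : ("edit" == p) = false := beq_eq_false_iff_ne.mpr (fun e => h5 e.symm)
  have e6 : ("review" == p) = false := beq_eq_false_iff_ne.mpr (fun e => h6 e.symm)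
  simp [List.find?, e1, e2, e3, e4, e5, e6, h1, h2, h3, h4, h5, h6]

lemma rank_bounds (p : String) :
    1 ≤ PySem.Dict.getD pvRankDict p 1 ∧ PySem.Dict.getD pvRankDict p 1 ≤ 3 := by
  rw [rank_eq]; split_ifs <;> omega

-- Core: A's two any-scans classify the same list as B's running-max fold.
lemma fold_classify (parts : List String) :
    ∀ a : Int, 1 ≤ a → a ≤ 3 →
      (if a = 3 ∨ parts.any (fun p => (["expert_review", "technical_draft"] : List String).contains p) then "high"
       else if a = 2 ∨ parts.any (fun p => (["research", "draft", "edit", "review"] : List String).contains p) then "medium"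
       else "low")
      = (if parts.foldl (fun r part => max r (PySem.Dict.getD pvRankDict part 1)) a == 3 then "high"
         else if parts.foldl (fun r part => max r (PySem.Dict.getD pvRankDict part 1)) a == 2 then "medium"
         else "low") := by
  induction parts with
  | nil =>
    intro a h1 h3
    by_cases ha3 : a = 3 <;> by_cases ha2 : a = 2 <;> simp_all
  | cons p ps ih =>
    intro a h1 h3
    have hb := rank_bounds p
    simp only [List.foldl_cons, List.any_cons]
    refine Eq.trans ?_ (ih (max a (PySem.Dict.getD pvRankDict p 1)) (by omega) (by omega))
    clear ih
    rw [rank_eq] at hb ⊢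
    by_cases hhi : (["expert_review", "technical_draft"] : List String).contains p <;>
      by_cases hmd : (["research", "draft", "edit", "review"] : List String).contains p <;>
      simp only [hhi, hmd, if_true, Bool.true_or, Bool.false_or] <;>
      split_ifs <;> simp_all [max_def] <;> (try split_ifs at *) <;> (try simp_all) <;> first | omega | aesop

-- A string not containing the separator splits to the singleton of itself.
lemma splitOn_go_not_infix (sep : List Char) :
    ∀ (fuel : Nat) (l cur : List Char) (acc : List (List Char)), ¬ sep <:+: l →
      PySem.Chars.splitOn.go sep fuel l cur acc = ((cur.reverse ++ l) :: acc).reverse := by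
  intro fuel
  induction fuel with
  | zero => intro l cur acc _; rw [PySem.Chars.splitOn.go.eq_def]
  | succ n ih =>
    intro l cur acc hinf
    cases l with
    | nil => rw [PySem.Chars.splitOn.go.eq_def]; simp
    | cons c rest =>
      rw [PySem.Chars.splitOn.go.eq_def]
      have hpre : sep.isPrefixOf (c :: rest) = false := by
        by_contra h
        exact hinf ((List.isPrefixOf_iff_prefix.mp (by simpa using h)).isInfix)
      simp only [hpre]
      rw [ih rest (c :: cur) acc (fun h => hinf (h.trans (List.suffix_cons c rest).isInfix))]
      simp

lemma split_singleton (s : String) (h : PySem.Str.isIn "_and_" s = false) :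
    PySem.Str.split? s "_and_" = some [s] := by
  have hinf : ¬ ("_and_".toList <:+: s.toList) := by
    rw [PySem.Str.isIn_eq] at h
    exact (PySem.Chars.isIn_eq_false_iff _ _).mp h
  simp only [PySem.Str.split?, PySem.Chars.split?, PySem.Chars.splitOn]
  rw [splitOn_go_not_infix "_and_".toList _ s.toList [] [] hinf]
  simp [String.ofList_toList]

-- ===== VERDICT (by name: the statement is the Claim_ definition above) =====
theorem determine_task_complexity_py_spec : Claim_equal_determine_task_complexity_py := by
  intro task_name _
  unfold Spec_determine_task_complexity_py determine_task_complexity_py determine_task_complexity_py_alt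
  by_cases h : PySem.Str.isIn "_and_" task_name
  · simp only [h, if_true]
    have := fold_classify ((PySem.Str.split? task_name "_and_").getD []) 1 (by omega) (by omega)
    simpa using this
  · simp only [h, Bool.false_eq_true, if_false]
    rw [split_singleton task_name (by simpa using h)]
    have := fold_classify [task_name] 1 (by omega) (by omega)
    simpa using this
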